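-- pv_equiv track=rewrite | github.com/ICB-DCM/FiguresMoSeS | Fig4_Blasi/simulations/blasi_helpers.py | get_next_possible_initial_model
-- ===== SOURCE A (Python) =====
-- import itertools
-- from typing import Dict, Iterable, Union, Tuple, List
--
-- N_PARAMETERS = 32
--
-- def one_indices_to_model_id(one_indices) -> str:
--     return 'M_' + ''.join([
--         '1' if one_index in one_indices else '0'
--         for one_index in range(N_PARAMETERS)
--     ])
--
-- def get_next_possible_initial_model(prev_init_model: str) -> Union[str, None]:
--     """ finds next model (in list of possible permutations)
--     list of possible permutations: goes from all to no parameters set and in each group of models with same number of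
--         set parameters it goes sort of in reversed binary order
--         e.g. 1111, 1110, 1101, 1011, 0111, 1100, 1010, 0110, 1001, 0101, 0011, 1000, 0100, 0010, 0001, 0000
--     returns: - model_id of next possible initial model if existing
--              - empty string (`''`) if no model exists after given prev_init_model
--     """
--     one_indices = [index - 2 for index, value in enumerate(prev_init_model) if value == '1']
--     n_free_parameters = len(one_indices)
--
--     if n_free_parameters == 0:
--         # At the smallest possible model, so terminate
--         return ''
--
--     if prev_init_model.endswith('1'*n_free_parameters):
--         # At the last model of this size, so return first model of `n-1` size
--         return one_indices_to_model_id(range(n_free_parameters - 1))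
--
--     n_free_parameters_combinations = itertools.combinations(range(N_PARAMETERS), r=n_free_parameters)
--     # Set index of iterator to position of `prev_init_model` in iterator. `assert` is unnecessary but may as well...
--     assert tuple(one_indices) in n_free_parameters_combinations
--     return one_indices_to_model_id(next(n_free_parameters_combinations))
-- ===== SOURCE B (Python) =====
-- N_PARAMETERS = 32
--
-- def _model_id(one_indices):
--     return 'M_' + ''.join('1' if i in one_indices else '0' for i in range(N_PARAMETERS))
--
-- def _next_combination(tail):
--     """Lexicographically next combination of range(32) for this suffix; None if the suffix is maximal."""
--     if not tail:
--         return None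
--     rest = _next_combination(tail[1:])
--     if rest is not None:
--         return [tail[0]] + rest
--     if tail[0] == N_PARAMETERS - len(tail):
--         return None
--     return list(range(tail[0] + 1, tail[0] + 1 + len(tail)))
--
-- def get_next_possible_initial_model(prev_init_model: str):
--     one_indices = [index - 2 for index, value in enumerate(prev_init_model) if value == '1']
--     n = len(one_indices)
--     if n == 0:
--         return ''
--     if prev_init_model.endswith('1' * n):
--         return _model_id(range(n - 1))
--     nxt = _next_combination(one_indices)
--     if nxt is None:
--         return ''
--     return _model_id(nxt)
-- ===== Notes on version B (the rewrite author's own statement) =====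
-- stated objective: alternative
-- what changed: A locates the successor by streaming through the itertools.combinations(range(32), k) sequence until it passes the current tuple; B computes the lexicographically next combination directly by a right-to-left recursive increment of the index list.
import Mathlib
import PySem

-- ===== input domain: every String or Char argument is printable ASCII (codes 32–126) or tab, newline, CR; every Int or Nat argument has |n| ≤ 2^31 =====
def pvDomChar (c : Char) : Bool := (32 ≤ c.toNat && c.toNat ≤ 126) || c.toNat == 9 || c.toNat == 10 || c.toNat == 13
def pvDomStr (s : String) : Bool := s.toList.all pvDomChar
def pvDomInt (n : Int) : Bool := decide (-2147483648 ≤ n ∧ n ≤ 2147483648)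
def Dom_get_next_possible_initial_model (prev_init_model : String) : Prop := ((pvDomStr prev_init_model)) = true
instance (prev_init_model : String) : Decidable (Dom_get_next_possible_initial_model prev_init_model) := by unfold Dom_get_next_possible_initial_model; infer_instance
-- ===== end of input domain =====

-- B computes the lexicographically next combination by a right-to-left recursive increment instead of
-- A's scan through the itertools.combinations stream; the equivalence proved is about RETURN values on Pre_.

-- ===== PORT A =====
-- one_indices_to_model_id (A) / _model_id (B): both sources define this same bit-string formatter,
-- ported once and used by both ports
def pvModelId (oneIndices : List Int) : String :=
  String.ofList ('M' :: '_' :: (PySem.List.pyRange 0 32 1).map (fun i => if i ∈ oneIndices then '1' else '0'))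

-- itertools.combinations(l, k), materialised in its (lexicographic) yield order
def pvCombinations : List Int → Nat → List (List Int)
  | _, 0 => [[]]
  | [], _ + 1 => []
  | x :: xs, k + 1 => (pvCombinations xs k).map (x :: ·) ++ pvCombinations xs (k + 1)

-- `assert tuple(c) in it` followed by `next(it)`: consume until c, return the following element
def pvAfterIn : List (List Int) → List Int → Option (List Int)
  | [], _ => none
  | d :: rest, c => if d = c then rest.head? else pvAfterIn rest c

def get_next_possible_initial_model (prev_init_model : String) : String :=
  let one_indices := (PySem.List.enumerate prev_init_model.toList).filterMap
    (fun iv => if iv.2 = '1' then some (iv.1 - 2) else none)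
  let n := one_indices.length
  if n = 0 then ""
  else if PySem.Str.endswith prev_init_model (String.ofList (List.replicate n '1')) then
    pvModelId (PySem.List.pyRange 0 ((n : Int) - 1) 1)
  else
    match pvAfterIn (pvCombinations (PySem.List.pyRange 0 32 1) n) one_indices with
    | some c => pvModelId c
    | none => ""   -- Python raises AssertionError / StopIteration here; excluded by Pre_

-- ===== PORT B =====
-- _next_combination: right-to-left recursive increment; none = suffix is maximal
def pvNextCombination : List Int → Option (List Int)
  | [] => none
  | x :: rest =>
    match pvNextCombination rest with
    | some r => some (x :: r)
    | none =>
      if x = 32 - ((rest.length : Int) + 1) then none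
      else some (PySem.List.pyRange (x + 1) (x + 1 + ((rest.length : Int) + 1)) 1)

def get_next_possible_initial_model_alt (prev_init_model : String) : String :=
  let one_indices := (PySem.List.enumerate prev_init_model.toList).filterMap
    (fun iv => if iv.2 = '1' then some (iv.1 - 2) else none)
  let n := one_indices.length
  if n = 0 then ""
  else if PySem.Str.endswith prev_init_model (String.ofList (List.replicate n '1')) then
    pvModelId (PySem.List.pyRange 0 ((n : Int) - 1) 1)
  else
    match pvNextCombination one_indices with
    | some nxt => pvModelId nxt
    | none => ""

-- ===== PRECONDITION & SPEC =====
-- Pre_ excludes exactly the inputs on which A raises: a '1' outside character positions 2..33 (its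
-- index-2 is then no combination of range(32), so the `assert … in` fails with AssertionError),
-- and the non-suffix case whose one_indices are the LAST combination (next() raises StopIteration).
def Pre_get_next_possible_initial_model (prev_init_model : String) : Prop :=
  let ones := (PySem.List.enumerate prev_init_model.toList).filterMap
    (fun iv => if iv.2 = '1' then some (iv.1 - 2) else none)
  ones = []
  ∨ PySem.Str.endswith prev_init_model (String.ofList (List.replicate ones.length '1')) = true
  ∨ ((∀ v ∈ ones, 0 ≤ v ∧ v < 32) ∧ ∃ v ∈ ones, v < 32 - (ones.length : Int))
instance (prev_init_model : String) : Decidable (Pre_get_next_possible_initial_model prev_init_model) := by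
  unfold Pre_get_next_possible_initial_model; infer_instance

def pvWitness_get_next_possible_initial_model : String := "M_10100000000000000000000000000000"

def Spec_get_next_possible_initial_model (prev_init_model : String) (out : String) : Prop := out = get_next_possible_initial_model_alt prev_init_model
instance (prev_init_model : String) (out : String) : Decidable (Spec_get_next_possible_initial_model prev_init_model out) := by unfold Spec_get_next_possible_initial_model; infer_instance

-- ===== CLAIM (what is proved, stated in full; the proofs are below) =====
def Claim_equal_get_next_possible_initial_model : Prop := ∀ (prev_init_model : String), Dom_get_next_possible_initial_model prev_init_model → Pre_get_next_possible_initial_model prev_init_model → Spec_get_next_possible_initial_model prev_init_model (get_next_possible_initial_model prev_init_model)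

-- ===== LEMMAS AND PROOFS =====

-- the integer interval [a, a+m) as a list
def pvRng : Int → Nat → List Int
  | _, 0 => []
  | a, m + 1 => a :: pvRng (a + 1) m

lemma pvMem_rng : ∀ (m : Nat) (a v : Int), v ∈ pvRng a m ↔ a ≤ v ∧ v < a + m := by
  intro m
  induction m with
  | zero => intro a v; simp [pvRng]
  | succ m ih =>
    intro a v
    simp only [pvRng, List.mem_cons, ih]
    push_cast
    omega

lemma pvLength_rng : ∀ (m : Nat) (a : Int), (pvRng a m).length = m := by
  intro m
  induction m with
  | zero => intro a; rfl
  | succ m ih => intro a; simp [pvRng, ih]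

lemma pvPyRange_eq_rng : ∀ (k : Nat) (a : Int), PySem.List.pyRange a (a + k) 1 = pvRng a k := by
  intro k
  induction k with
  | zero => intro a; exact PySem.List.pyRange_one_eq_nil (by omega)
  | succ k ih =>
    intro a
    rw [PySem.List.pyRange_one_cons (by omega)]
    have h : a + ((k : Int) + 1) = (a + 1) + k := by ring
    push_cast
    rw [h, ih (a + 1)]
    rfl

lemma pvCombos_len_le : ∀ (l : List Int) (k : Nat) (c : List Int), c ∈ pvCombinations l k → k ≤ l.length := by
  intro l
  induction l with
  | nil =>
    intro k c h
    cases k with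
    | zero => simp
    | succ k => simp [pvCombinations] at h
  | cons x xs ih =>
    intro k c h
    cases k with
    | zero => simp
    | succ k =>
      simp only [pvCombinations, List.mem_append, List.mem_map] at h
      rcases h with ⟨c', hc', _⟩ | h
      · have := ih k c' hc'
        simp; omega
      · have := ih (k + 1) c h
        simp; omega

lemma pvCombos_nil_of_lt : ∀ (l : List Int) (k : Nat), l.length < k → pvCombinations l k = [] := by
  intro l
  induction l with
  | nil => intro k h; cases k with
    | zero => simp at h
    | succ k => rfl
  | cons x xs ih =>
    intro k h
    cases k with
    | zero => simp at h
    | succ k =>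
      simp only [List.length_cons] at h
      simp only [pvCombinations, ih k (by omega), ih (k + 1) (by omega), List.map_nil, List.append_nil]

lemma pvCombos_cons_mem : ∀ (l : List Int) (k : Nat) (c : List Int), c ∈ pvCombinations l (k + 1) →
    ∃ h t, c = h :: t ∧ h ∈ l := by
  intro l
  induction l with
  | nil => intro k c h; simp [pvCombinations] at h
  | cons x xs ih =>
    intro k c hc
    simp only [pvCombinations, List.mem_append, List.mem_map] at hc
    rcases hc with ⟨c', _, rfl⟩ | hc
    · exact ⟨x, c', rfl, by simp⟩
    · obtain ⟨h0, t, rfl, hmem⟩ := ih k _ hc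
      exact ⟨h0, t, rfl, by simp [hmem]⟩

lemma pvCombos_ne_nil : ∀ (l : List Int) (k : Nat), k ≤ l.length → pvCombinations l k ≠ [] := by
  intro l
  induction l with
  | nil =>
    intro k h
    cases k with
    | zero => simp [pvCombinations]
    | succ k => simp at h
  | cons x xs ih =>
    intro k h
    cases k with
    | zero => simp [pvCombinations]
    | succ k =>
      simp only [List.length_cons] at h
      have := ih k (by omega)
      simp only [pvCombinations, ne_eq, List.append_eq_nil_iff, List.map_eq_nil_iff, not_and]
      intro hmap
      exact absurd hmap this

lemma pvHead?_combos_rng : ∀ (k m : Nat) (a : Int), k ≤ m →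
    (pvCombinations (pvRng a m) k).head? = some (pvRng a k) := by
  intro k
  induction k with
  | zero => intro m a _; cases m <;> rfl
  | succ k ih =>
    intro m a hkm
    cases m with
    | zero => omega
    | succ m =>
      have hne : pvCombinations (pvRng (a + 1) m) k ≠ [] :=
        pvCombos_ne_nil _ _ (by rw [pvLength_rng]; omega)
      rcases List.exists_cons_of_ne_nil hne with ⟨c0, L, hL⟩
      have h0 := ih m (a + 1) (by omega)
      rw [hL] at h0
      simp only [List.head?_cons, Option.some.injEq] at h0
      show (pvCombinations (a :: pvRng (a + 1) m) (k + 1)).head? = some (a :: pvRng (a + 1) k)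
      simp only [pvCombinations, hL]
      simp [h0]

lemma pvGetLast?_combos_rng : ∀ (m : Nat) (a : Int) (k : Nat), k ≤ m →
    (pvCombinations (pvRng a m) k).getLast? = some (pvRng (a + ((m - k : Nat) : Int)) k) := by
  intro m
  induction m with
  | zero =>
    intro a k hk
    interval_cases k
    simp [pvRng, pvCombinations]
  | succ m ih =>
    intro a k hk
    cases k with
    | zero =>
      cases hc : pvCombinations (pvRng a (m + 1)) 0 <;> simp [pvCombinations] at hc <;> simp [hc, pvRng]
    | succ k =>
      show (pvCombinations (a :: pvRng (a + 1) m) (k + 1)).getLast? = _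
      simp only [pvCombinations]
      by_cases hklt : k + 1 ≤ m
      · have hne : pvCombinations (pvRng (a + 1) m) (k + 1) ≠ [] :=
          pvCombos_ne_nil _ _ (by rw [pvLength_rng]; omega)
        rw [List.getLast?_append_of_ne_nil _ hne, ih (a + 1) (k + 1) hklt]
        have harith : a + 1 + ((m - (k + 1) : Nat) : Int) = a + ((m + 1 - (k + 1) : Nat) : Int) := by omega
        rw [harith]
      · have hkm : k = m := by omega
        subst hkm
        rw [pvCombos_nil_of_lt (pvRng (a + 1) k) (k + 1) (by rw [pvLength_rng]; omega)]
        rw [List.append_nil, List.getLast?_map, ih (a + 1) k (by omega)]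
        have h1 : ((k - k : Nat) : Int) = 0 := by omega
        have h2 : ((k + 1 - (k + 1) : Nat) : Int) = 0 := by omega
        rw [h1, h2]
        simp only [add_zero, Option.map_some, Option.some.injEq]
        rfl

lemma pvNodup_combos_rng : ∀ (m : Nat) (a : Int) (k : Nat), (pvCombinations (pvRng a m) k).Nodup := by
  intro m
  induction m with
  | zero =>
    intro a k
    cases k <;> simp [pvRng, pvCombinations]
  | succ m ih =>
    intro a k
    cases k with
    | zero => simp [pvCombinations]
    | succ k =>
      show (pvCombinations (a :: pvRng (a + 1) m) (k + 1)).Nodup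
      simp only [pvCombinations]
      refine List.Nodup.append ?_ (ih (a + 1) (k + 1)) ?_
      · exact (ih (a + 1) k).map (fun c d h => by simpa using h)
      · intro c hc1 hc2
        obtain ⟨c', _, rfl⟩ := List.mem_map.mp hc1
        obtain ⟨h0, t, heq, hmem⟩ := pvCombos_cons_mem _ _ _ hc2
        have hha : h0 = a := by
          injection heq with h1 h2
          exact h1.symm
        rw [hha] at hmem
        have := (pvMem_rng m (a + 1) a).mp hmem
        omega

lemma pvAfterIn_append_some : ∀ (L1 : List (List Int)) (L2 : List (List Int)) (c d : List Int),
    pvAfterIn L1 c = some d → pvAfterIn (L1 ++ L2) c = some d := by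
  intro L1
  induction L1 with
  | nil => intro L2 c d h; simp [pvAfterIn] at h
  | cons e rest ih =>
    intro L2 c d h
    simp only [List.cons_append, pvAfterIn] at h ⊢
    by_cases hec : e = c
    · rw [if_pos hec] at h ⊢
      rcases rest with _ | ⟨r0, rest'⟩
      · simp at h
      · simpa using h
    · rw [if_neg hec] at h ⊢
      exact ih L2 c d h

lemma pvAfterIn_map_cons : ∀ (L : List (List Int)) (c d : List Int) (x : Int),
    pvAfterIn L c = some d → pvAfterIn (L.map (x :: ·)) (x :: c) = some (x :: d) := by
  intro L
  induction L with
  | nil => intro c d x h; simp [pvAfterIn] at h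
  | cons e rest ih =>
    intro c d x h
    simp only [pvAfterIn] at h
    simp only [List.map_cons, pvAfterIn]
    by_cases hec : e = c
    · rw [if_pos hec] at h
      rw [if_pos (by rw [hec])]
      rcases rest with _ | ⟨r0, rest'⟩
      · simp at h
      · simp at h
        simp [h]
    · rw [if_neg hec] at h
      rw [if_neg (by simp [hec])]
      exact ih c d x h

lemma pvAfterIn_not_mem : ∀ (L1 : List (List Int)) (L2 : List (List Int)) (c : List Int),
    c ∉ L1 → pvAfterIn (L1 ++ L2) c = pvAfterIn L2 c := by
  intro L1
  induction L1 with
  | nil => intro L2 c _; rfl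
  | cons e rest ih =>
    intro L2 c h
    simp only [List.mem_cons, not_or] at h
    simp only [List.cons_append, pvAfterIn]
    rw [if_neg (fun hh => h.1 hh.symm)]
    exact ih L2 c h.2

lemma pvAfterIn_last : ∀ (L : List (List Int)) (L2 : List (List Int)) (c : List Int),
    L.Nodup → L.getLast? = some c → pvAfterIn (L ++ L2) c = L2.head? := by
  intro L
  induction L with
  | nil => intro L2 c _ h; simp at h
  | cons e rest ih =>
    intro L2 c hnd hl
    rcases rest with _ | ⟨r0, rest'⟩
    · simp only [List.getLast?_singleton, Option.some.injEq] at hl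
      simp [pvAfterIn, hl]
    · have hl' : (r0 :: rest').getLast? = some c := by
        rwa [List.getLast?_cons_cons] at hl
      have hcmem : c ∈ r0 :: rest' := List.mem_of_getLast? hl'
      have hec : e ≠ c := by
        intro hec
        exact (List.nodup_cons.mp hnd).1 (hec ▸ hcmem)
      simp only [List.cons_append, pvAfterIn, if_neg hec]
      exact ih L2 c (List.nodup_cons.mp hnd).2 hl'

lemma pvNextComb_eq_none_iff : ∀ (c : List Int),
    pvNextCombination c = none ↔ c = pvRng (32 - (c.length : Int)) c.length := by
  intro c
  induction c with
  | nil => simp [pvNextCombination, pvRng]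
  | cons x rest ih =>
    simp only [pvNextCombination]
    have hlen : (x :: rest).length = rest.length + 1 := by simp
    cases hrec : pvNextCombination rest with
    | some r =>
      simp only [reduceCtorEq, false_iff]
      intro heq
      rw [hlen, pvRng] at heq
      injection heq with h1 h2
      have h3 : rest = pvRng (32 - (rest.length : Int)) rest.length := by
        have he : 32 - ((rest.length + 1 : Nat) : Int) + 1 = 32 - (rest.length : Int) := by
          push_cast; ring
        rw [← he]
        exact h2
      rw [hrec] at ih
      exact absurd (ih.mpr h3) (by simp)
    | none =>
      have hrest : rest = pvRng (32 - (rest.length : Int)) rest.length := (hrec ▸ ih).mp rfl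
      rw [hlen, pvRng]
      constructor
      · intro h
        by_cases hx : x = 32 - ((rest.length : Int) + 1)
        · rw [List.cons.injEq]
          refine ⟨by rw [hx]; push_cast; ring, ?_⟩
          calc rest = pvRng (32 - (rest.length : Int)) rest.length := hrest
            _ = pvRng (32 - ((rest.length + 1 : Nat) : Int) + 1) rest.length := by
                congr 1; push_cast; ring
        · rw [if_neg hx] at h
          simp at h
      · intro heq
        rw [List.cons.injEq] at heq
        rw [if_pos (by rw [heq.1]; push_cast; ring)]

lemma pvMem_combos_of_sorted : ∀ (m : Nat) (a : Int) (c : List Int), c.Pairwise (· < ·) →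
    (∀ v ∈ c, v ∈ pvRng a m) → c ∈ pvCombinations (pvRng a m) c.length := by
  intro m
  induction m with
  | zero =>
    intro a c _ hsub
    rcases c with _ | ⟨h, t⟩
    · simp [pvCombinations]
    · exact absurd (hsub h (by simp)) (by simp [pvRng])
  | succ m ih =>
    intro a c hpw hsub
    rcases c with _ | ⟨h, t⟩
    · show [] ∈ pvCombinations (a :: pvRng (a + 1) m) 0
      simp [pvCombinations]
    · have hh := (pvMem_rng (m + 1) a h).mp (hsub h (by simp))
      show h :: t ∈ pvCombinations (a :: pvRng (a + 1) m) (t.length + 1)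
      simp only [pvCombinations, List.mem_append, List.mem_map]
      by_cases hha : h = a
      · left
        refine ⟨t, ?_, by rw [hha]⟩
        apply ih (a + 1) t (hpw.sublist (List.sublist_cons_self h t))
        intro v hv
        have hlt : h < v := (List.pairwise_cons.mp hpw).1 v hv
        have := (pvMem_rng (m + 1) a v).mp (hsub v (by simp [hv]))
        rw [pvMem_rng]
        push_cast at this ⊢
        omega
      · right
        have hall : ∀ v ∈ h :: t, v ∈ pvRng (a + 1) m := by
          intro v hv
          have hva := (pvMem_rng (m + 1) a v).mp (hsub v hv)
          rw [pvMem_rng]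
          rcases List.mem_cons.mp hv with rfl | hvt
          · push_cast at hva ⊢; omega
          · have hlt : h < v := (List.pairwise_cons.mp hpw).1 v hvt
            push_cast at hva ⊢
            omega
        exact ih (a + 1) (h :: t) hpw hall

lemma pvSucc_combos : ∀ (m : Nat) (a : Int) (c w : List Int), a + (m : Int) = 32 →
    c ∈ pvCombinations (pvRng a m) c.length → pvNextCombination c = some w →
    pvAfterIn (pvCombinations (pvRng a m) c.length) c = some w := by
  intro m
  induction m with
  | zero =>
    intro a c w _ hc hn
    rcases c with _ | ⟨x, t⟩
    · simp [pvNextCombination] at hn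
    · simp only [List.length_cons] at hc
      simp [pvRng, pvCombinations] at hc
  | succ m ih =>
    intro a c w ha hc hn
    rcases c with _ | ⟨x, t⟩
    · simp [pvNextCombination] at hn
    · simp only [List.length_cons] at hc ⊢
      have hsplit : pvCombinations (pvRng a (m + 1)) (t.length + 1)
          = (pvCombinations (pvRng (a + 1) m) t.length).map (a :: ·)
            ++ pvCombinations (pvRng (a + 1) m) (t.length + 1) := rfl
      rw [hsplit] at hc ⊢
      rcases List.mem_append.mp hc with hmap | hright
      · obtain ⟨c', hc', heq⟩ := List.mem_map.mp hmap
        injection heq with hxa hts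
        subst hts
        subst hxa
        simp only [pvNextCombination] at hn
        cases hrec : pvNextCombination c' with
        | some r =>
          rw [hrec] at hn
          simp only [Option.some.injEq] at hn
          subst hn
          have hrec2 := ih (a + 1) c' r (by push_cast at ha ⊢; omega) hc' hrec
          exact pvAfterIn_append_some _ _ _ _ (pvAfterIn_map_cons _ _ _ _ hrec2)
        | none =>
          rw [hrec] at hn
          rw [apply_ite (f := fun o => o = some w)] at hn
          by_cases hx : a = 32 - ((c'.length : Int) + 1)
          · rw [if_pos hx] at hn
            simp at hn
          · rw [if_neg hx] at hn
            simp only [Option.some.injEq] at hn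
            have ht := (pvNextComb_eq_none_iff c').mp hrec
            have htle : c'.length ≤ m := by
              have := pvCombos_len_le _ _ _ hc'
              rwa [pvLength_rng] at this
            have hlt : c'.length + 1 ≤ m := by
              push_cast at ha
              omega
            have hgl : ((pvCombinations (pvRng (a + 1) m) c'.length).map (a :: ·)).getLast?
                = some (a :: c') := by
              rw [List.getLast?_map, pvGetLast?_combos_rng m (a + 1) c'.length htle]
              simp only [Option.map_some, Option.some.injEq, List.cons.injEq, true_and]
              have he2 : a + 1 + ((m - c'.length : Nat) : Int) = 32 - ((c'.length : Int)) := by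
                push_cast at ha ⊢
                omega
              rw [he2]
              exact ht.symm
            have hnd : ((pvCombinations (pvRng (a + 1) m) c'.length).map (a :: ·)).Nodup :=
              (pvNodup_combos_rng m (a + 1) c'.length).map (fun c d h => by simpa using h)
            rw [pvAfterIn_last _ _ _ hnd hgl]
            rw [pvHead?_combos_rng (c'.length + 1) m (a + 1) hlt]
            rw [← hn]
            have harr : a + 1 + ((c'.length + 1 : Nat) : Int) = a + 1 + ((c'.length : Int) + 1) := by
              push_cast; ring
            rw [show PySem.List.pyRange (a + 1) (a + 1 + ((c'.length : Int) + 1)) 1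
                  = pvRng (a + 1) (c'.length + 1) from by
                rw [← pvPyRange_eq_rng (c'.length + 1) (a + 1), harr]]
      · obtain ⟨h0, t0, heq0, hmem0⟩ := pvCombos_cons_mem _ _ _ hright
        have hne : x :: t ∉ (pvCombinations (pvRng (a + 1) m) t.length).map (a :: ·) := by
          intro hmm
          obtain ⟨c'', _, heq'⟩ := List.mem_map.mp hmm
          injection heq' with h1 _
          have hh0 : h0 = x := by injection heq0 with hh _; exact hh.symm
          have := (pvMem_rng m (a + 1) h0).mp hmem0
          omega
        rw [pvAfterIn_not_mem _ _ _ hne]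
        have := ih (a + 1) (x :: t) w (by push_cast at ha ⊢; omega)
          (by simpa using hright) hn
        simpa using this

lemma pvOnes_sorted (cs : List Char) :
    ((PySem.List.enumerate cs).filterMap (fun iv => if iv.2 = '1' then some (iv.1 - 2) else none)).Pairwise (· < ·) := by
  rw [List.pairwise_filterMap]
  refine List.Pairwise.imp ?_ (PySem.List.pairwise_lt_enumerate (xs := cs) (s := 0))
  intro p q h x hx y hy
  split_ifs at hx hy <;> simp_all
  omega

-- ===== VERDICT (by name: the statement is the Claim_ definition above) =====
theorem get_next_possible_initial_model_spec : Claim_equal_get_next_possible_initial_model := by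
  intro s _hdom hpre
  unfold Spec_get_next_possible_initial_model
  simp only [get_next_possible_initial_model, get_next_possible_initial_model_alt]
  simp only [Pre_get_next_possible_initial_model] at hpre
  by_cases h0 : ((PySem.List.enumerate s.toList).filterMap
      (fun iv => if iv.2 = '1' then some (iv.1 - 2) else none)).length = 0
  · simp only [if_pos h0]
  · simp only [if_neg h0]
    by_cases hend : PySem.Str.endswith s (String.ofList (List.replicate
        ((PySem.List.enumerate s.toList).filterMap
          (fun iv => if iv.2 = '1' then some (iv.1 - 2) else none)).length '1')) = true
    · simp only [hend, if_pos]
    · simp only [hend, Bool.false_eq_true, if_false]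
      rcases hpre with hnil | hend' | ⟨hbnd, v, hv, hvlt⟩
      · exact absurd (by rw [hnil]; rfl) h0
      · exact absurd hend' hend
      · set E := (PySem.List.enumerate s.toList).filterMap
          (fun iv => if iv.2 = '1' then some (iv.1 - 2) else none) with hE
        have hmem : E ∈ pvCombinations (pvRng 0 32) E.length :=
          pvMem_combos_of_sorted 32 0 E (pvOnes_sorted s.toList)
            (fun u hu => (pvMem_rng 32 0 u).mpr (by have := hbnd u hu; push_cast; omega))
        obtain ⟨w, hw⟩ : ∃ w, pvNextCombination E = some w := by
          cases hcase : pvNextCombination E with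
          | some w => exact ⟨w, rfl⟩
          | none =>
            have hEeq := (pvNextComb_eq_none_iff E).mp hcase
            have : v ∈ pvRng (32 - (E.length : Int)) E.length := hEeq ▸ hv
            have := (pvMem_rng E.length (32 - (E.length : Int)) v).mp this
            omega
        have hrange : PySem.List.pyRange 0 32 1 = pvRng 0 32 := by
          have h := pvPyRange_eq_rng 32 0
          norm_num at h
          exact h
        rw [hrange, pvSucc_combos 32 0 E w (by norm_num) hmem hw, hw]
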